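-- pv_equiv track=rewrite | github.com/DanGooding/netns-explorer | render.py | wrap_command
-- ===== SOURCE A (Python) =====
-- def wrap_command(command: str | None) -> str:
--     if not command:
--         return ''
--
--     target_width = 40
--     break_at = ' -'
--
--     lines = []
--     while len(command) > target_width:
--         break_index = command.rfind(break_at, 0, target_width)
--         if break_index == -1:
--             break
--         lines.append(command[:break_index])
--         command = command[break_index + 1:]
--
--     lines.append(command)
--     return '\n'.join(lines)
-- ===== SOURCE B (Python) =====
-- def wrap_command(command):
--     if not command:
--         return ''
--     n = len(command)
--     # one pass: precompute all ' -' break positions, then consume with a pointer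
--     breaks = [i for i in range(n - 1) if command[i] == ' ' and command[i + 1] == '-']
--     lines = []
--     cur = 0
--     j = 0
--     while n - cur > 40:
--         best = -1
--         while j < len(breaks) and breaks[j] <= cur + 38:
--             best = breaks[j]
--             j += 1
--         if best == -1:
--             break
--         lines.append(command[cur:best])
--         cur = best + 1
--     lines.append(command[cur:])
--     return '\n'.join(lines)
-- ===== Notes on version B (the rewrite author's own statement) =====
-- stated objective: alternative
-- what changed: A repeatedly calls rfind over a sliding 40-char window of the shrinking string; B precomputes the list of space-hyphen break positions in one scan and packs lines by consuming that list left-to-right with a persistent pointer, never rescanning text.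
import Mathlib
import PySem

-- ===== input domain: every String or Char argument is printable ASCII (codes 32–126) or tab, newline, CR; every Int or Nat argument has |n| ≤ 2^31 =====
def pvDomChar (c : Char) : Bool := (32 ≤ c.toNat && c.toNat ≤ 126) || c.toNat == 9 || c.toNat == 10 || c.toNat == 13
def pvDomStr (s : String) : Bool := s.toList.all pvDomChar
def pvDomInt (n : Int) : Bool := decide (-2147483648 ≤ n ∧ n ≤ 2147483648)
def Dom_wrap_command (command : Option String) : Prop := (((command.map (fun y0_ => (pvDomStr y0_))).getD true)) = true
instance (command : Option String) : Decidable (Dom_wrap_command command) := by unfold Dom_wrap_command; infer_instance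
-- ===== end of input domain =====

-- B replaces A's per-line rfind over a sliding 40-char window by one precomputed list of
-- ' -' break positions consumed left-to-right with a pointer (objective: alternative).

-- ===== PORT A =====
-- A's while loop: while len(command) > 40: rfind(' -', 0, 40); break out on -1; cut and continue.
def wrapA (cs : List Char) : List (List Char) :=
  if 40 < cs.length then
    let bi := PySem.Chars.rfindFrom cs [' ', '-'] 0 (some 40)
    if bi = -1 then [cs]
    else cs.take bi.toNat :: wrapA (cs.drop (bi.toNat + 1))
  else [cs]
  termination_by cs.length
  decreasing_by simp; omega

def wrap_command (command : Option String) : String :=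
  match command with
  | none => ""
  | some s =>
    if s = "" then ""
    else PySem.Str.join "\n" ((wrapA s.toList).map (fun l => String.ofList l))

-- ===== PORT B =====
-- command[i] == ' ' and command[i + 1] == '-'  (B only evaluates this at in-range i)
def pvIsBreak (cs : List Char) (i : Nat) : Bool :=
  (cs[i]? == some ' ') && (cs[i+1]? == some '-')

-- breaks = [i for i in range(n - 1) if command[i] == ' ' and command[i + 1] == '-']
def pvBreaks (cs : List Char) : List Nat :=
  (List.range (cs.length - 1)).filter (fun i => pvIsBreak cs i)

-- the inner while: consume breaks[j], breaks[j+1], … while ≤ cur + 38; best = last consumed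
def pvTakeWin (cur : Nat) : List Nat → Option Nat × List Nat
  | [] => (none, [])
  | b :: rest =>
    if b ≤ cur + 38 then
      let r := pvTakeWin cur rest
      (some (r.1.getD b), r.2)
    else (none, b :: rest)

-- termination helpers for pvPack (cited by its decreasing_by)
lemma pvTakeWin_len (cur : Nat) :
    ∀ (bks : List Nat), (pvTakeWin cur bks).2.length ≤ bks.length := by
  intro bks
  induction bks with
  | nil => simp [pvTakeWin]
  | cons b t ih =>
    by_cases hb : b ≤ cur + 38
    · simp only [pvTakeWin, if_pos hb]
      simp only [List.length_cons]
      omega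
    · simp [pvTakeWin, if_neg hb]

lemma pvTakeWin_some_lt (cur : Nat) (bks : List Nat) (k : Nat) (rest : List Nat)
    (h : pvTakeWin cur bks = (some k, rest)) : rest.length < bks.length := by
  cases bks with
  | nil => simp [pvTakeWin] at h
  | cons b t =>
    by_cases hb : b ≤ cur + 38
    · have hrest : rest = (pvTakeWin cur t).2 := by
        simp only [pvTakeWin, if_pos hb] at h
        exact (congrArg Prod.snd h).symm
      have := pvTakeWin_len cur t
      simp [hrest, List.length_cons]
      omega
    · simp [pvTakeWin, if_neg hb] at h

-- the outer while + trailing append, with B's persisting pointer j carried as the list suffix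
def pvPack (cs : List Char) (cur : Nat) (bks : List Nat) : List (List Char) :=
  if 40 < cs.length - cur then
    match h : pvTakeWin cur bks with
    | (none, _) => [cs.drop cur]
    | (some best, rest) => ((cs.drop cur).take (best - cur)) :: pvPack cs (best + 1) rest
  else [cs.drop cur]
  termination_by bks.length
  decreasing_by exact pvTakeWin_some_lt cur bks best rest h

def wrap_command_alt (command : Option String) : String :=
  match command with
  | none => ""
  | some s =>
    if s = "" then ""
    else PySem.Str.join "\n" ((pvPack s.toList 0 (pvBreaks s.toList)).map (fun l => String.ofList l))

-- ===== PRECONDITION & SPEC =====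
def Spec_wrap_command (command : Option String) (out : String) : Prop := out = wrap_command_alt command
instance (command : Option String) (out : String) : Decidable (Spec_wrap_command command out) := by unfold Spec_wrap_command; infer_instance

-- ===== CLAIM (what is proved, stated in full; the proofs are below) =====
def Claim_equal_wrap_command : Prop := ∀ (command : Option String), Dom_wrap_command command → Spec_wrap_command command (wrap_command command)

-- ===== LEMMAS AND PROOFS =====

-- [' ','-'] is a prefix of l iff l[0] = ' ' and l[1] = '-'
lemma pfx2 (l : List Char) :
    List.isPrefixOf [' ', '-'] l = ((l[0]? == some ' ') && (l[1]? == some '-')) := by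
  match l with
  | [] => simp [List.isPrefixOf]
  | [a] => simp [List.isPrefixOf]
  | a :: b :: t =>
    simp only [List.isPrefixOf, List.getElem?_cons_zero, List.getElem?_cons_succ]
    rw [BEq.comm (a := ' '), BEq.comm (a := '-')]
    simp

lemma isBreak_drop (cs : List Char) (cur i : Nat) :
    pvIsBreak (cs.drop cur) i = pvIsBreak cs (cur + i) := by
  simp [pvIsBreak, List.getElem?_drop, Nat.add_assoc]

-- the match condition of A's rfind at position j of s.take 40
lemma Q_take40 (s : List Char) (j : Nat) :
    List.isPrefixOf [' ', '-'] ((s.take 40).drop j)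
      = if j ≤ 38 then pvIsBreak s j else false := by
  rw [pfx2]
  by_cases hj : j ≤ 38
  · have h1 : j + 0 < 40 := by omega
    have h1' : j < 40 := by omega
    have h2 : j + 1 < 40 := by omega
    simp [List.getElem?_drop, h1', h2, if_pos hj, pvIsBreak]
  · have h2 : ¬ (j + 1 < 40) := by omega
    simp [List.getElem?_drop, List.getElem?_take, h2, if_neg hj]

lemma go_neg (l : List Char) (m : Nat)
    (h : ∀ j ≤ m, List.isPrefixOf [' ', '-'] (l.drop j) = false) :
    PySem.Chars.rfind.go l [' ', '-'] m = -1 := by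
  induction m with
  | zero =>
    have h0 := h 0 (le_refl 0)
    simp at h0
    rw [PySem.Chars.rfind.go]
    simp [h0]
  | succ j ih =>
    have hj := h (j+1) (le_refl _)
    rw [PySem.Chars.rfind.go]
    simp only [hj, Bool.false_eq_true, if_false]
    exact ih (fun i hi => h i (by omega))

lemma go_pos (l : List Char) (m k : Nat)
    (hk : List.isPrefixOf [' ', '-'] (l.drop k) = true) (hkm : k ≤ m)
    (hmax : ∀ j, k < j → j ≤ m → List.isPrefixOf [' ', '-'] (l.drop j) = false) :
    PySem.Chars.rfind.go l [' ', '-'] m = (k : Int) := by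
  induction m with
  | zero =>
    have hk0 : k = 0 := by omega
    subst hk0
    simp at hk
    rw [PySem.Chars.rfind.go]
    simp [hk]
  | succ j ih =>
    rw [PySem.Chars.rfind.go]
    by_cases hkj : k = j + 1
    · subst hkj
      simp at hk
      simp [hk]
    · have hf : List.isPrefixOf [' ', '-'] (l.drop (j+1)) = false := hmax (j+1) (by omega) (le_refl _)
      simp only [hf, Bool.false_eq_true, if_false]
      exact ih (by omega) (fun i hi h2 => hmax i hi (by omega))

-- A's command.rfind(' -', 0, 40) under len > 40 reduces to the downward scan over s.take 40
lemma rfind40_core (s : List Char) (h40 : 40 < s.length) :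
    PySem.Chars.rfindFrom s [' ', '-'] 0 (some 40)
      = (if PySem.Chars.rfind.go (s.take 40) [' ', '-'] 40 = -1 then -1
         else PySem.Chars.rfind.go (s.take 40) [' ', '-'] 40) := by
  have h1 : ¬ ((s.length : Int) < 40) := by omega
  have hlen : (s.take 40).length = 40 := by simp; omega
  unfold PySem.Chars.rfindFrom PySem.Chars.rfind
  simp [h1, hlen]

-- negative case: no break at any index ≤ 38
lemma rfind40_neg (s : List Char) (h40 : 40 < s.length)
    (h : ∀ i ≤ 38, pvIsBreak s i = false) :
    PySem.Chars.rfindFrom s [' ', '-'] 0 (some 40) = -1 := by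
  rw [rfind40_core s h40]
  have hgo : PySem.Chars.rfind.go (s.take 40) [' ', '-'] 40 = -1 := by
    apply go_neg
    intro j hj
    rw [Q_take40]
    by_cases hj38 : j ≤ 38
    · simp [hj38, h j hj38]
    · simp [hj38]
  simp [hgo]

-- positive case: k is the greatest break index ≤ 38
lemma rfind40_pos (s : List Char) (k : Nat) (h40 : 40 < s.length)
    (hk : pvIsBreak s k = true) (hk38 : k ≤ 38)
    (hmax : ∀ j, k < j → j ≤ 38 → pvIsBreak s j = false) :
    PySem.Chars.rfindFrom s [' ', '-'] 0 (some 40) = (k : Int) := by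
  rw [rfind40_core s h40]
  have hgo : PySem.Chars.rfind.go (s.take 40) [' ', '-'] 40 = (k : Int) := by
    apply go_pos
    · rw [Q_take40]; simp [hk38, hk]
    · omega
    · intro j hj1 hj2
      rw [Q_take40]
      by_cases hj38 : j ≤ 38
      · simp [hj38, hmax j hj1 hj38]
      · simp [hj38]
  rw [hgo]
  have : ¬ ((k : Int) = -1) := by omega
  simp [this]

lemma takeWin_none (cur : Nat) (bks : List Nat) (h : ∀ b ∈ bks, ¬ b ≤ cur + 38) :
    pvTakeWin cur bks = (none, bks) := by
  cases bks with
  | nil => rfl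
  | cons b t => simp [pvTakeWin, h b (by simp)]

lemma takeWin_none_inv (cur : Nat) (bks r : List Nat)
    (h : pvTakeWin cur bks = (none, r)) (hp : bks.Pairwise (· < ·)) :
    ∀ b ∈ bks, ¬ b ≤ cur + 38 := by
  cases bks with
  | nil => simp
  | cons b t =>
    by_cases hb : b ≤ cur + 38
    · simp [pvTakeWin, if_pos hb] at h
    · intro c hc
      rcases List.mem_cons.mp hc with rfl | hc'
      · exact hb
      · have := List.rel_of_pairwise_cons hp hc'
        omega

lemma takeWin_some (cur : Nat) (k : Nat) :
    ∀ (bks : List Nat), bks.Pairwise (· < ·) → k ∈ bks → k ≤ cur + 38 →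
      (∀ b ∈ bks, b ≤ cur + 38 → b ≤ k) →
      pvTakeWin cur bks = (some k, bks.filter (fun b => decide (cur + 38 < b))) := by
  intro bks
  induction bks with
  | nil => intro _ hk; simp at hk
  | cons b t ih =>
    intro hp hk hk38 hmax
    have hbk : b ≤ k := by
      rcases List.mem_cons.mp hk with rfl | hk'
      · exact le_refl _
      · exact le_of_lt (List.rel_of_pairwise_cons hp hk')
    have hb38 : b ≤ cur + 38 := le_trans hbk hk38
    simp only [pvTakeWin, if_pos hb38]
    rcases List.mem_cons.mp hk with rfl | hk'
    · -- k = b: everything in t is beyond the window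
      have ht : ∀ c ∈ t, ¬ c ≤ cur + 38 := by
        intro c hc hcle
        have h1 := List.rel_of_pairwise_cons hp hc
        have h2 := hmax c (List.mem_cons_of_mem _ hc) hcle
        omega
      rw [takeWin_none cur t ht]
      have hfil : (k :: t).filter (fun c => decide (cur + 38 < c)) = t := by
        rw [List.filter_cons]
        have hbf : ¬ (cur + 38 < k) := by omega
        simp only [hbf, decide_false, Bool.false_eq_true, if_false]
        exact List.filter_eq_self.mpr (fun c hc => by
          have := ht c hc
          simp
          omega)
      rw [hfil]
      simp
    · -- k ∈ t
      rw [ih (List.Pairwise.of_cons hp) hk' hk38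
          (fun c hc h2 => hmax c (List.mem_cons_of_mem _ hc) h2)]
      have hbf : ¬ (cur + 38 < b) := by omega
      rw [List.filter_cons]
      simp only [hbf, decide_false, Bool.false_eq_true, if_false]
      simp

lemma list_max (l : List Nat) (hne : l ≠ []) : ∃ k ∈ l, ∀ b ∈ l, b ≤ k := by
  induction l with
  | nil => simp at hne
  | cons a t ih =>
    cases t with
    | nil => exact ⟨a, by simp⟩
    | cons c u =>
      obtain ⟨k, hk, hmax⟩ := ih (by simp)
      by_cases h : a ≤ k
      · refine ⟨k, List.mem_cons_of_mem _ hk, ?_⟩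
        intro b hb
        rcases List.mem_cons.mp hb with rfl | hb'
        · exact h
        · exact hmax b hb'
      · refine ⟨a, by simp, ?_⟩
        intro b hb
        rcases List.mem_cons.mp hb with rfl | hb'
        · exact le_refl _
        · exact le_trans (hmax b hb') (by omega)

-- the main loop correspondence: B's pack over the break suffix = A's loop over the char suffix
lemma pack_eq (cs : List Char) :
    ∀ (m : Nat) (bks : List Nat) (cur : Nat), bks.length ≤ m →
      (∀ b, b ∈ bks ↔ (cur ≤ b ∧ pvIsBreak cs b = true)) →
      bks.Pairwise (· < ·) →
      pvPack cs cur bks = wrapA (cs.drop cur) := by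
  intro m
  induction m with
  | zero =>
    intro bks cur hlen hmem hp
    have hnil : bks = [] := List.eq_nil_of_length_eq_zero (by omega)
    subst hnil
    rw [pvPack, wrapA]
    have hdl : (cs.drop cur).length = cs.length - cur := by simp
    by_cases h40 : 40 < cs.length - cur
    · have h40' : 40 < (cs.drop cur).length := by omega
      have hbi : PySem.Chars.rfindFrom (cs.drop cur) [' ', '-'] 0 (some 40) = -1 := by
        apply rfind40_neg _ h40'
        intro i hi
        rw [isBreak_drop]
        cases hx : pvIsBreak cs (cur + i) with
        | false => rfl
        | true => exact absurd ((hmem (cur + i)).mpr ⟨by omega, hx⟩) (by simp)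
      simp [h40, hbi, pvTakeWin]
    · have h40' : ¬ 40 < (cs.drop cur).length := by omega
      simp [h40]
  | succ m ih =>
    intro bks cur hlen hmem hp
    rw [pvPack]
    have hdl : (cs.drop cur).length = cs.length - cur := by simp
    by_cases h40 : 40 < cs.length - cur
    · have h40' : 40 < (cs.drop cur).length := by omega
      rw [if_pos h40]
      split
      · -- pvTakeWin returned none: no break within the window; both emit the rest and stop
        rename_i r heq
        have hnob := takeWin_none_inv cur bks r heq hp
        have hbi : PySem.Chars.rfindFrom (cs.drop cur) [' ', '-'] 0 (some 40) = -1 := by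
          apply rfind40_neg _ h40'
          intro i hi
          rw [isBreak_drop]
          cases hx : pvIsBreak cs (cur + i) with
          | false => rfl
          | true =>
            have hmem' := (hmem (cur + i)).mpr ⟨by omega, hx⟩
            have := hnob _ hmem'
            omega
        rw [wrapA]
        simp [hbi]
      · -- pvTakeWin returned some best: best is the greatest break in the window
        rename_i best rest heq
        -- first establish the window is nonempty, then identify best with the maximum
        have hex : ∃ j ∈ bks, j ≤ cur + 38 := by
          by_contra hno
          rw [takeWin_none cur bks (fun b hb hble => hno ⟨b, hb, hble⟩)] at heq
          simp at heq
        set S := bks.filter (fun b => decide (b ≤ cur + 38)) with hS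
        have hSne : S ≠ [] := by
          obtain ⟨j, hj, hj38⟩ := hex
          intro hS0
          have : j ∈ S := List.mem_filter.mpr ⟨hj, by simp [hj38]⟩
          rw [hS0] at this
          simp at this
        obtain ⟨k, hkS, hkmax⟩ := list_max S hSne
        have hk_mem : k ∈ bks := (List.mem_filter.mp hkS).1
        have hk38 : k ≤ cur + 38 := by
          have := (List.mem_filter.mp hkS).2
          simpa using this
        have hmax' : ∀ b ∈ bks, b ≤ cur + 38 → b ≤ k := fun b hb h2 =>
          hkmax b (List.mem_filter.mpr ⟨hb, by simp [h2]⟩)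
        have htw := takeWin_some cur k bks hp hk_mem hk38 hmax'
        rw [htw] at heq
        obtain ⟨hbest, hrest⟩ : best = k ∧ rest = bks.filter (fun b => decide (cur + 38 < b)) := by
          constructor
          · have := congrArg Prod.fst heq
            simpa using this.symm
          · exact (congrArg Prod.snd heq).symm
        subst hbest
        subst hrest
        have hcurk : cur ≤ best := (hmem best |>.mp hk_mem).1
        have hbrk : pvIsBreak cs best = true := (hmem best |>.mp hk_mem).2
        -- A makes the same cut
        have hbi : PySem.Chars.rfindFrom (cs.drop cur) [' ', '-'] 0 (some 40)
            = ((best - cur : Nat) : Int) := by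
          apply rfind40_pos _ _ h40'
          · rw [isBreak_drop]
            have : cur + (best - cur) = best := by omega
            rw [this]
            exact hbrk
          · omega
          · intro j hj1 hj2
            rw [isBreak_drop]
            cases hx : pvIsBreak cs (cur + j) with
            | false => rfl
            | true =>
              have hmem' := (hmem (cur + j)).mpr ⟨by omega, hx⟩
              have := hmax' _ hmem' (by omega)
              omega
        rw [wrapA]
        have hne : ¬ (((best - cur : Nat) : Int) = -1) := by omega
        simp only [h40', if_pos, hbi, hne, if_false, Int.toNat_natCast]
        have hdd : (cs.drop cur).drop (best - cur + 1) = cs.drop (best + 1) := by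
          rw [List.drop_drop]
          congr 1
          omega
        rw [hdd]
        congr 1
        -- recursive call via the induction hypothesis
        apply ih
        · have hklt : (bks.filter (fun b => decide (cur + 38 < b))).length < bks.length :=
            List.length_filter_lt_length_iff_exists.mpr ⟨best, hk_mem, by simp; omega⟩
          omega
        · intro b
          rw [List.mem_filter]
          constructor
          · rintro ⟨hb, h2⟩
            have h3 := (hmem b).mp hb
            refine ⟨?_, h3.2⟩
            simp at h2
            omega
          · rintro ⟨hb1, hb2⟩
            have hbmem : b ∈ bks := (hmem b).mpr ⟨by omega, hb2⟩
            refine ⟨hbmem, ?_⟩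
            simp
            by_contra hle
            have := hmax' b hbmem (by omega)
            omega
        · exact List.Pairwise.filter _ hp
    · have h40' : ¬ 40 < (cs.drop cur).length := by omega
      rw [wrapA]
      simp [h40]

-- ===== VERDICT (by name: the statement is the Claim_ definition above) =====
theorem wrap_command_spec : Claim_equal_wrap_command := by
  intro command _
  unfold Spec_wrap_command wrap_command wrap_command_alt
  match command with
  | none => rfl
  | some s =>
    by_cases hs : s = ""
    · simp [hs]
    · simp only [if_neg hs]
      congr 1
      have h := pack_eq s.toList (pvBreaks s.toList).length (pvBreaks s.toList) 0 (le_refl _)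
        (by
          intro b
          simp only [pvBreaks, List.mem_filter, List.mem_range]
          constructor
          · rintro ⟨-, h2⟩; exact ⟨Nat.zero_le _, h2⟩
          · rintro ⟨-, h2⟩
            refine ⟨?_, h2⟩
            simp only [pvIsBreak, Bool.and_eq_true, beq_iff_eq] at h2
            obtain ⟨h3, -⟩ := List.getElem?_eq_some_iff.mp h2.2
            omega)
        (List.Pairwise.filter _ (List.pairwise_lt_range))
      rw [h, List.drop_zero]
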